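-- pv_equiv track=rewrite | github.com/AshwinHarishP/GeeksforGeeks | Python Coding Practice/sum array puzzle.py | SumArray
-- ===== SOURCE A (Python) =====
-- def SumArray(arr,n):
--     int_arr = []
--     for element in arr:
--         element = int(element)
--         int_arr.append(element)
--
--     result_list = []
--
--     for i in range(n):
--         result = sum(int_arr[:i] + int_arr[i+1:])
--         result_list.append(result)
--
--     arr[:] = result_list
--
--     return arr
-- ===== SOURCE B (Python) =====
-- def SumArray(arr, n):
--     total = sum(arr)
--     arr[:] = [total - arr[i] for i in range(n)]
--     return arr
-- ===== Notes on version B (the rewrite author's own statement) =====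
-- stated objective: faster
-- what changed: B computes the total sum once and returns total minus each element instead of re-summing two slices per index; Pre_ excludes n > len(arr), where A's slicing accidentally yields the full total for the extra indices while B naturally raises IndexError.
-- outside the precondition, e.g. on SumArray([1, 2], 3): A returns [2, 1, 3], B raises IndexError
import Mathlib
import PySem

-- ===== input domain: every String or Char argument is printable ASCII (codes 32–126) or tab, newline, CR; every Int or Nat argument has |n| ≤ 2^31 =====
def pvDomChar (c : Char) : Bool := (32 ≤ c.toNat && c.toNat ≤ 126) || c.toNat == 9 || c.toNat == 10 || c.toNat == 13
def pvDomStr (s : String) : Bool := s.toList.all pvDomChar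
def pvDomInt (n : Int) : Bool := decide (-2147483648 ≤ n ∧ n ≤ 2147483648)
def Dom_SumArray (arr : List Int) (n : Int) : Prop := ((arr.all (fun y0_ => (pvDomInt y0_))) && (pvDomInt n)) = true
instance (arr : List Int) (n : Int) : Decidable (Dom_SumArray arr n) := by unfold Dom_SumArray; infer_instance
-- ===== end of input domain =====

-- B computes the total sum once and takes total minus each element; A re-sums two slices per index.
-- A mutates arr in place (arr[:] = ...), and so does B; the equivalence proved here is about the return value only.

-- ===== PORT A =====
def SumArray (arr : List Int) (n : Int) : List Int :=
  let int_arr := arr.foldl (fun acc e => acc ++ [e]) []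
  let result_list := (PySem.List.pyRange 0 n 1).foldl (fun acc i =>
    acc ++ [(PySem.List.slice int_arr none (some i) ++
             PySem.List.slice int_arr (some (i + 1)) none).foldl (· + ·) 0]) []
  result_list

-- ===== PORT B =====
def SumArray_alt (arr : List Int) (n : Int) : List Int :=
  let total := arr.foldl (· + ·) 0
  (PySem.List.pyRange 0 n 1).map (fun i => total - PySem.List.pyGetD arr i 0)

-- ===== PRECONDITION & SPEC =====
-- Pre_ excludes n > len(arr): there A's out-of-range slices accidentally sum to the whole
-- list, yielding the full total for the extra indices, while B's natural arr[i] raises IndexError.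
def Pre_SumArray (arr : List Int) (n : Int) : Prop := n ≤ (arr.length : Int)
instance (arr : List Int) (n : Int) : Decidable (Pre_SumArray arr n) := by unfold Pre_SumArray; infer_instance
def pvWitness_SumArray : List Int × Int := ([3, 1, 2], 3)
def Spec_SumArray (arr : List Int) (n : Int) (out : List Int) : Prop := out = SumArray_alt arr n
instance (arr : List Int) (n : Int) (out : List Int) : Decidable (Spec_SumArray arr n out) := by unfold Spec_SumArray; infer_instance

-- ===== CLAIM (what is proved, stated in full; the proofs are below) =====
def Claim_equal_SumArray : Prop := ∀ (arr : List Int) (n : Int), Dom_SumArray arr n → Pre_SumArray arr n → Spec_SumArray arr n (SumArray arr n)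

-- ===== LEMMAS AND PROOFS =====

-- Python's sum = List.sum (foldl over (+) from 0)
theorem pv_foldl_sum (l : List Int) (s : Int) : l.foldl (· + ·) s = s + l.sum := by
  induction l generalizing s with
  | nil => simp
  | cons a t ih => simp only [List.foldl_cons, List.sum_cons, ih]; ring

-- sum of the two slices around an in-range natural position j
theorem pv_split_sum (arr : List Int) (j : ℕ) (hj : j < arr.length) :
    (arr.take j).sum + (arr.drop (j + 1)).sum = arr.sum - arr.getD j 0 := by
  induction arr generalizing j with
  | nil => simp at hj
  | cons a t ih =>
    cases j with
    | zero => simp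
    | succ j =>
      have h := ih j (by simpa using hj)
      simp only [List.take_succ_cons, List.drop_succ_cons, List.getD_cons_succ,
        List.sum_cons]
      linarith

theorem SumArray_spec : Claim_equal_SumArray := by
  intro arr n _ hpre
  unfold Spec_SumArray SumArray SumArray_alt
  simp only [PySem.List.foldl_append_singleton_eq_self, List.nil_append]
  rw [PySem.List.foldl_append_singleton_eq_map, List.nil_append]
  apply List.map_congr_left
  intro i hi
  have ⟨h0, hn⟩ := PySem.List.mem_pyRange_one.mp hi
  obtain ⟨j, rfl⟩ := Int.eq_ofNat_of_zero_le h0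
  have hj : j < arr.length := by
    have := lt_of_lt_of_le hn hpre
    exact_mod_cast this
  rw [PySem.List.slice_to_natCast]
  have : ((j : Int) + 1) = ((j + 1 : ℕ) : Int) := by push_cast; ring
  rw [this, PySem.List.slice_from_natCast]
  simp only [List.foldl_append, pv_foldl_sum, zero_add, PySem.List.pyGetD_natCast]
  exact pv_split_sum arr j hj
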